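-- pv_equiv track=rewrite | github.com/pinkavaj/RS41_gps_disciplined_oscillator | nmea_check.py | ubx_msg_cksum
-- ===== SOURCE A (Python) =====
-- def ubx_msg_cksum(data):
--     ck_a = ck_b = 0
--     for b in data:
--         ck_a += b
--         ck_b += ck_a
--     ck_a &= 0xff
--     ck_b &= 0xff
--     return ck_a, ck_b
-- ===== SOURCE B (Python) =====
-- def ubx_msg_cksum(data):
--     data = list(data)
--     n = len(data)
--     ck_a = sum(data) & 0xff
--     ck_b = sum((n - i) * b for i, b in enumerate(data)) & 0xff
--     return ck_a, ck_b
-- ===== Notes on version B (the rewrite author's own statement) =====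
-- stated objective: alternative
-- what changed: Replaces the cascading two-accumulator Fletcher loop with two independent closed-form sums: ck_a = sum(data) & 0xff and ck_b as the weighted sum sum((n-i)*b) & 0xff, counting each byte's contribution to all prefix sums directly.
import Mathlib
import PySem

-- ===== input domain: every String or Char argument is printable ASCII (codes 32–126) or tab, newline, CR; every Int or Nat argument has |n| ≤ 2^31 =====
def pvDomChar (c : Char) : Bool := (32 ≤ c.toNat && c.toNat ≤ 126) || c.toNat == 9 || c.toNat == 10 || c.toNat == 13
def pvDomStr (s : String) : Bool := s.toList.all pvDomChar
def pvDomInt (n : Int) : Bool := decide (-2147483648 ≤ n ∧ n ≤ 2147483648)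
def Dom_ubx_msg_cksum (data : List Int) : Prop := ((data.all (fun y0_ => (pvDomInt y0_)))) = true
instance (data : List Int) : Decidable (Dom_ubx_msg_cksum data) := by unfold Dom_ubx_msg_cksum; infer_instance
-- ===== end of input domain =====

-- B replaces A's cascading two-accumulator loop with two independent closed-form sums
-- (plain sum for ck_a, an (n-i)-weighted sum for ck_b); objective: alternative decomposition.

-- ===== PORT A =====
-- for b in data: ck_a += b; ck_b += ck_a   then mask both with 0xff
def ubx_msg_cksum (data : List Int) : Int × Int :=
  let p := data.foldl (fun (p : Int × Int) b => (p.1 + b, p.2 + (p.1 + b))) (0, 0)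
  (PySem.Int.band p.1 255, PySem.Int.band p.2 255)

-- ===== PORT B =====
-- n = len(data); ck_a = sum(data) & 0xff; ck_b = sum((n-i)*b for i,b in enumerate(data)) & 0xff
def ubx_msg_cksum_alt (data : List Int) : Int × Int :=
  let n : Int := data.length
  let ck_a := PySem.Int.band (data.foldl (fun a b => a + b) 0) 255
  let ck_b := PySem.Int.band
    ((PySem.List.enumerate data).foldl (fun acc p => acc + (n - p.1) * p.2) 0) 255
  (ck_a, ck_b)

-- ===== PRECONDITION & SPEC =====
def Spec_ubx_msg_cksum (data : List Int) (out : Int × Int) : Prop := out = ubx_msg_cksum_alt data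
instance (data : List Int) (out : Int × Int) : Decidable (Spec_ubx_msg_cksum data out) := by unfold Spec_ubx_msg_cksum; infer_instance

-- ===== CLAIM (what is proved, stated in full; the proofs are below) =====
def Claim_equal_ubx_msg_cksum : Prop := ∀ (data : List Int), Dom_ubx_msg_cksum data → Spec_ubx_msg_cksum data (ubx_msg_cksum data)

-- ===== LEMMAS AND PROOFS =====

-- a foldl that only adds distributes over its initial accumulator
theorem pv_foldl_add_init {α : Type} (g : α → Int) :
    ∀ (l : List α) (acc : Int),
      l.foldl (fun a p => a + g p) acc = acc + l.foldl (fun a p => a + g p) 0 := by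
  intro l
  induction l with
  | nil => intro acc; simp
  | cons x xs ih =>
      intro acc
      simp only [List.foldl_cons]
      rw [ih (acc + g x), ih (0 + g x)]
      ring

-- the weighted sum over enumerate, unrolled one step
theorem pv_wsum_cons (n s x : Int) (xs : List Int) :
    (PySem.List.enumerate (x :: xs) s).foldl (fun acc p => acc + (n - p.1) * p.2) 0
      = (n - s) * x
        + (PySem.List.enumerate xs (s + 1)).foldl (fun acc p => acc + (n - p.1) * p.2) 0 := by
  rw [PySem.List.enumerate_cons]
  simp only [List.foldl_cons]
  rw [pv_foldl_add_init (fun p : Int × Int => (n - p.1) * p.2)]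
  ring_nf

-- A's loop state characterised: first = running sum, second = weighted sum with weights n - i
theorem pv_loop_char :
    ∀ (l : List Int) (s a cb : Int),
      l.foldl (fun (p : Int × Int) b => (p.1 + b, p.2 + (p.1 + b))) (a, cb)
        = (a + l.foldl (fun a b => a + b) 0,
           cb + (l.length : Int) * a
             + (PySem.List.enumerate l s).foldl
                 (fun acc p => acc + ((s + (l.length : Int)) - p.1) * p.2) 0) := by
  intro l
  induction l with
  | nil => intro s a cb; simp [PySem.List.enumerate]
  | cons x xs ih =>
      intro s a cb
      simp only [List.foldl_cons]
      rw [ih (s + 1) (a + x) (cb + (a + x))]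
      rw [pv_foldl_add_init (fun b : Int => b)]
      rw [pv_wsum_cons]
      simp only [List.length_cons, Prod.mk.injEq, Nat.cast_add, Nat.cast_one]
      have h : s + 1 + (xs.length : Int) = s + ((xs.length : Int) + 1) := by ring
      rw [h]
      refine ⟨?_, by ring⟩
      rw [pv_foldl_add_init (fun b : Int => b) xs (0 + x)]
      ring

-- ===== VERDICT (by name: the statement is the Claim_ definition above) =====
theorem ubx_msg_cksum_spec : Claim_equal_ubx_msg_cksum := by
  intro data _
  unfold Spec_ubx_msg_cksum ubx_msg_cksum ubx_msg_cksum_alt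
  simp only []
  rw [pv_loop_char data 0]
  simp
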